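-- pv_equiv track=rewrite | github.com/msDesc/tei-msdesc-authorities | src/tei_msdesc_authorities/authorities/core.py | best_insertion_gap
-- ===== SOURCE A (Python) =====
-- def best_insertion_gap(existing_numbers: list[int], new_number: int) -> int:
--     total_lower = sum(1 for number in existing_numbers if number < new_number)
--     lower_before = 0
--     greater_before = 0
--     best_gap = 0
--     best_score: int | None = None
--
--     for gap in range(len(existing_numbers) + 1):
--         lower_after = total_lower - lower_before
--         score = greater_before + lower_after
--         if (
--             best_score is None
--             or score < best_score
--             or (score == best_score and gap > best_gap)
--         ):
--             best_gap = gap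
--             best_score = score
--         if gap == len(existing_numbers):
--             break
--         current = existing_numbers[gap]
--         if current < new_number:
--             lower_before += 1
--         elif current > new_number:
--             greater_before += 1
--
--     return best_gap
-- ===== SOURCE B (Python) =====
-- def best_insertion_gap(existing_numbers: list[int], new_number: int) -> int:
--     # Backward scan: gap g beats gap g' > g iff the suffix balance
--     # (#greater - #lower among elements from g onward) strictly exceeds
--     # the best balance seen so far.  No count pass, no score table.
--     best = len(existing_numbers)
--     balance = 0
--     best_balance = 0
--     for g in range(len(existing_numbers) - 1, -1, -1):
--         x = existing_numbers[g]
--         if x > new_number: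
--             balance += 1
--         elif x < new_number:
--             balance -= 1
--         if balance > best_balance:
--             best = g
--             best_balance = balance
--     return best
-- ===== Notes on version B (the rewrite author's own statement) =====
-- stated objective: alternative
-- what changed: B replaces A's count-then-score algorithm (pre-count of lower elements, per-gap score greater_before + lower_after, fused last-argmin selection) by a single backward scan that maintains only the suffix balance #greater - #lower and keeps the leftmost gap whose balance strictly exceeds the best so far; no count pass, no score values exist in B.
import Mathlib
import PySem

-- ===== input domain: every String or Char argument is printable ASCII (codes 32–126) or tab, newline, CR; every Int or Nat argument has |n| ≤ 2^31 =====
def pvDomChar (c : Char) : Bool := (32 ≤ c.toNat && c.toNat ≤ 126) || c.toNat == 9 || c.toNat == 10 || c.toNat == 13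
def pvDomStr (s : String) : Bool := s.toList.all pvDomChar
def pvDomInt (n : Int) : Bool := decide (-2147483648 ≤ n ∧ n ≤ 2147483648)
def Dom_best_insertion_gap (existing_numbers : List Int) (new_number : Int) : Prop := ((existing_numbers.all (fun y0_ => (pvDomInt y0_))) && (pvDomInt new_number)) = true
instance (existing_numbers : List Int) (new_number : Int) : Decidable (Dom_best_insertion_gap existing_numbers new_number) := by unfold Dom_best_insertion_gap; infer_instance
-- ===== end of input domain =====

-- B drops A's count pass and per-gap scores entirely: a single backward scan maximizing the
-- suffix balance (#greater - #lower) picks the same gap (alternative algorithm, same cost).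

-- ===== PORT A =====
-- A's update condition: best_score is None, or score < best_score, or (score == best_score and gap > best_gap)
def aHit (score gap bg : Int) : Option Int → Bool
  | none => true
  | some b => score < b || (score == b && bg < gap)

-- A's for-loop over range(len+1) with the break at gap == len, carried as recursion over the
-- remaining list (the element indexed by `gap`) with the same state (lb, gb, best_gap, best_score).
def aLoop (nn tl lb gb bg : Int) (bs : Option Int) (gap : Int) : List Int → Int
  | [] =>
      -- gap == len(existing_numbers): record, then break and return best_gap
      let score := gb + (tl - lb)
      if aHit score gap bg bs then gap else bg
  | current :: rest =>
      let score := gb + (tl - lb)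
      let bg' := if aHit score gap bg bs then gap else bg
      let bs' := if aHit score gap bg bs then some score else bs
      if current < nn then aLoop nn tl (lb + 1) gb bg' bs' (gap + 1) rest
      else if current > nn then aLoop nn tl lb (gb + 1) bg' bs' (gap + 1) rest
      else aLoop nn tl lb gb bg' bs' (gap + 1) rest

def best_insertion_gap (existing_numbers : List Int) (new_number : Int) : Int :=
  let total_lower := existing_numbers.foldl (fun acc number => if number < new_number then acc + 1 else acc) (0 : Int)
  aLoop new_number total_lower 0 0 0 none 0 existing_numbers

-- ===== PORT B =====
-- Source B's backward for-loop (g from len-1 down to 0, state balance/best/best_balance), as the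
-- obvious structural recursion: the tail is processed first, then the head element; `best` is
-- kept relative to the current suffix (0 = insert before the head), matching the absolute
-- indices of the Python loop once the whole list is consumed.
def bLoop (nn : Int) : List Int → Int × Int × Int
  | [] => (0, 0, 0)   -- (balance, best = len [] , best_balance)
  | x :: rest =>
      let r := bLoop nn rest
      let balance := r.1 + (if x > nn then 1 else if x < nn then -1 else 0)
      if balance > r.2.2 then (balance, 0, balance) else (balance, r.2.1 + 1, r.2.2)

def best_insertion_gap_alt (existing_numbers : List Int) (new_number : Int) : Int :=
  (bLoop new_number existing_numbers).2.1

-- ===== PRECONDITION & SPEC =====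
def Spec_best_insertion_gap (existing_numbers : List Int) (new_number : Int) (out : Int) : Prop := out = best_insertion_gap_alt existing_numbers new_number
instance (existing_numbers : List Int) (new_number : Int) (out : Int) : Decidable (Spec_best_insertion_gap existing_numbers new_number out) := by unfold Spec_best_insertion_gap; infer_instance

-- ===== CLAIM (what is proved, stated in full; the proofs are below) =====
def Claim_equal_best_insertion_gap : Prop := ∀ (existing_numbers : List Int) (new_number : Int), Dom_best_insertion_gap existing_numbers new_number → Spec_best_insertion_gap existing_numbers new_number (best_insertion_gap existing_numbers new_number)

-- ===== LEMMAS AND PROOFS =====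

-- A's tail scores (gap 1 .. n) built by prefix accumulation from the start score s.
def accumScores (nn s : Int) : List Int → List Int
  | [] => []
  | number :: rest =>
      let s' := if number < nn then s - 1 else if number > nn then s + 1 else s
      s' :: accumScores nn s' rest

-- A's selection behaviour, abstracted to act on a ready-made list of scores.
def selA (gap bg : Int) (bs : Option Int) : List Int → Int
  | [] => bg
  | s :: rest =>
      let bg' := if aHit s gap bg bs then gap else bg
      let bs' := if aHit s gap bg bs then some s else bs
      selA (gap + 1) bg' bs' rest

-- A's selection once a best score exists: update on score ≤ best (ties to the later gap).
def selB (gap bg b : Int) : List Int → Int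
  | [] => bg
  | s :: rest => if s ≤ b then selB (gap + 1) gap s rest else selB (gap + 1) bg b rest

-- (offset of the LAST minimum, its value) of a score list, computed from the front.
def lastMin : List Int → Option (Int × Int)
  | [] => none
  | s :: rest =>
      match lastMin rest with
      | none => some (0, s)
      | some (i, m) => if m ≤ s then some (i + 1, m) else some (0, s)

theorem aLoop_eq_selA (rest : List Int) : ∀ (nn tl lb gb bg : Int) (bs : Option Int) (gap : Int),
    aLoop nn tl lb gb bg bs gap rest
      = selA gap bg bs ((gb + (tl - lb)) :: accumScores nn (gb + (tl - lb)) rest) := by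
  induction rest with
  | nil => intro nn tl lb gb bg bs gap; simp [aLoop, selA, accumScores]
  | cons x rest ih =>
      intro nn tl lb gb bg bs gap
      simp only [selA]
      simp only [aLoop]
      rw [accumScores]
      by_cases h1 : x < nn
      · simp only [if_pos h1]
        have e : gb + (tl - lb) - 1 = gb + (tl - (lb + 1)) := by ring
        rw [e]; exact ih nn tl (lb + 1) gb _ _ (gap + 1)
      · by_cases h2 : x > nn
        · simp only [if_neg h1, if_pos h2]
          have e : gb + (tl - lb) + 1 = (gb + 1) + (tl - lb) := by ring
          rw [e]; exact ih nn tl lb (gb + 1) _ _ (gap + 1)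
        · simp only [if_neg h1, if_neg h2]
          exact ih nn tl lb gb _ _ (gap + 1)

theorem selA_eq_selB (l : List Int) : ∀ (gap bg b : Int), bg < gap →
    selA gap bg (some b) l = selB gap bg b l := by
  induction l with
  | nil => intro gap bg b _; rfl
  | cons s rest ih =>
      intro gap bg b hlt
      simp only [selA, selB, aHit]
      by_cases hle : s ≤ b
      · have hc : (decide (s < b) || (s == b && decide (bg < gap))) = true := by
          rcases lt_or_eq_of_le hle with h | h <;> simp [h, hlt]
        simp only [hc, hle, if_true]
        exact ih (gap + 1) gap s (by omega)
      · have hc : (decide (s < b) || (s == b && decide (bg < gap))) = false := by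
          simp only [Bool.or_eq_false_iff, Bool.and_eq_false_iff]
          refine ⟨by simpa using (by omega : ¬ s < b), Or.inl (by simpa using (by omega : ¬ s = b))⟩
        simp only [hc, hle, Bool.false_eq_true, if_false]
        exact ih (gap + 1) bg b (by omega)

theorem selB_lastMin (l : List Int) : ∀ (gap bg b : Int),
    (lastMin l = none → selB gap bg b l = bg)
    ∧ (∀ i m : Int, lastMin l = some (i, m) → selB gap bg b l = if m ≤ b then gap + i else bg) := by
  induction l with
  | nil =>
      intro gap bg b
      exact ⟨fun _ => rfl, fun i m hm => by simp [lastMin] at hm⟩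
  | cons s rest ih =>
      intro gap bg b
      cases h : lastMin rest with
      | none =>
          have hlm : lastMin (s :: rest) = some (0, s) := by simp [lastMin, h]
          refine ⟨fun hc => (by rw [hlm] at hc; simp at hc), ?_⟩
          intro i m heq
          rw [hlm] at heq
          have hi : i = 0 ∧ m = s := by
            have := heq; simp only [Option.some.injEq, Prod.mk.injEq] at this
            exact ⟨this.1.symm, this.2.symm⟩
          obtain ⟨hi0, hms⟩ := hi
          subst hi0 hms
          simp only [selB]
          rw [(ih (gap + 1) gap m).1 h, (ih (gap + 1) bg b).1 h]
          split_ifs <;> omega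
      | some p =>
          obtain ⟨i0, m0⟩ := p
          refine ⟨fun hc => ?_, ?_⟩
          · by_cases hms : m0 ≤ s <;> simp [lastMin, h, hms] at hc
          · intro i m heq
            simp only [selB]
            rw [(ih (gap + 1) gap s).2 i0 m0 h, (ih (gap + 1) bg b).2 i0 m0 h]
            by_cases hms : m0 ≤ s
            · have hlm : lastMin (s :: rest) = some (i0 + 1, m0) := by simp [lastMin, h, hms]
              rw [hlm] at heq
              have : i0 + 1 = i ∧ m0 = m := by
                simpa only [Option.some.injEq, Prod.mk.injEq] using heq
              obtain ⟨h1, h2⟩ := this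
              split_ifs <;> omega
            · have hlm : lastMin (s :: rest) = some (0, s) := by simp [lastMin, h, hms]
              rw [hlm] at heq
              have : (0 : Int) = i ∧ s = m := by
                simpa only [Option.some.injEq, Prod.mk.injEq] using heq
              obtain ⟨h1, h2⟩ := this
              split_ifs <;> omega

-- The backward balance scan computes: best = the last argmin of the full score list
-- (s, then accumScores nn s xs), and best_balance = (final score) - (min score), for ANY start s.
theorem bLoop_char (nn : Int) (xs : List Int) : ∀ s : Int,
    (lastMin (accumScores nn s xs) = none → bLoop nn xs = (0, 0, 0))
    ∧ (∀ i m : Int, lastMin (accumScores nn s xs) = some (i, m) →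
        ((bLoop nn xs).2.1 = if m ≤ s then 1 + i else 0)
        ∧ (bLoop nn xs).2.2 = s + (bLoop nn xs).1 - min s m) := by
  induction xs with
  | nil =>
      intro s
      exact ⟨fun _ => rfl, fun i m hm => by simp [accumScores, lastMin] at hm⟩
  | cons x rest ih =>
      intro s
      obtain ⟨d, hd1, hd2⟩ : ∃ d : Int,
          (if x > nn then (1 : Int) else if x < nn then -1 else 0) = d
          ∧ (if x < nn then s - 1 else if x > nn then s + 1 else s) = s + d := by
        refine ⟨_, rfl, ?_⟩
        by_cases h1 : x < nn <;> by_cases h2 : x > nn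
        · exact absurd h1 (by omega)
        · simp only [if_neg h2, if_pos h1]; try omega
        · simp only [if_neg h1, if_pos h2]; try omega
        · simp only [if_neg h1, if_neg h2]; try omega
      have hacc : accumScores nn s (x :: rest) = (s + d) :: accumScores nn (s + d) rest := by
        rw [accumScores, hd2]
      have hbl : bLoop nn (x :: rest)
          = (if (bLoop nn rest).1 + d > (bLoop nn rest).2.2
              then ((bLoop nn rest).1 + d, 0, (bLoop nn rest).1 + d)
              else ((bLoop nn rest).1 + d, (bLoop nn rest).2.1 + 1, (bLoop nn rest).2.2)) := by
        simp only [bLoop, hd1]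
      have hIH := ih (s + d)
      cases h : lastMin (accumScores nn (s + d) rest) with
      | none =>
          have h0 : bLoop nn rest = (0, 0, 0) := hIH.1 h
          have e1 : (bLoop nn rest).1 = 0 := by rw [h0]
          have e2 : (bLoop nn rest).2.1 = 0 := by rw [h0]
          have e3 : (bLoop nn rest).2.2 = 0 := by rw [h0]
          have hlm : lastMin (accumScores nn s (x :: rest)) = some (0, s + d) := by
            rw [hacc]; simp [lastMin, h]
          refine ⟨fun hc => (by rw [hlm] at hc; simp at hc), ?_⟩
          intro i m heq
          rw [hlm] at heq
          have hinj : (0 : Int) = i ∧ s + d = m := by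
            simpa only [Option.some.injEq, Prod.mk.injEq] using heq
          obtain ⟨hi, hm⟩ := hinj
          rw [hbl, e1, e2, e3]
          by_cases hc : (0 : Int) + d > 0
          · rw [if_pos hc]
            refine ⟨?_, ?_⟩
            · show (0 : Int) = if m ≤ s then 1 + i else 0
              split_ifs <;> omega
            · show (0 : Int) + d = s + (0 + d) - min s m
              omega
          · rw [if_neg hc]
            refine ⟨?_, ?_⟩
            · show (0 : Int) + 1 = if m ≤ s then 1 + i else 0
              split_ifs <;> omega
            · show (0 : Int) = s + (0 + d) - min s m
              omega
      | some p =>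
          obtain ⟨i0, m0⟩ := p
          obtain ⟨h1, h2⟩ := hIH.2 i0 m0 h
          refine ⟨fun hc => ?_, ?_⟩
          · rw [hacc] at hc
            by_cases hms : m0 ≤ s + d <;> simp [lastMin, h, hms] at hc
          · intro i m heq
            rw [hacc] at heq
            have him : (i = if m0 ≤ s + d then i0 + 1 else 0)
                ∧ (m = if m0 ≤ s + d then m0 else s + d) := by
              by_cases hms : m0 ≤ s + d
              · have hlm : lastMin ((s + d) :: accumScores nn (s + d) rest)
                    = some (i0 + 1, m0) := by simp [lastMin, h, hms]
                rw [hlm] at heq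
                have hinj : i0 + 1 = i ∧ m0 = m := by
                  simpa only [Option.some.injEq, Prod.mk.injEq] using heq
                rw [if_pos hms, if_pos hms]
                exact ⟨hinj.1.symm, hinj.2.symm⟩
              · have hlm : lastMin ((s + d) :: accumScores nn (s + d) rest)
                    = some (0, s + d) := by simp [lastMin, h, hms]
                rw [hlm] at heq
                have hinj : (0 : Int) = i ∧ s + d = m := by
                  simpa only [Option.some.injEq, Prod.mk.injEq] using heq
                rw [if_neg hms, if_neg hms]
                exact ⟨hinj.1.symm, hinj.2.symm⟩
            obtain ⟨hi, hm⟩ := him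
            rw [hbl]
            by_cases hc : (bLoop nn rest).1 + d > (bLoop nn rest).2.2
            · rw [if_pos hc]
              rw [h2] at hc
              refine ⟨?_, ?_⟩
              · show (0 : Int) = if m ≤ s then 1 + i else 0
                by_cases hms : m0 ≤ s + d
                · rw [if_pos hms] at hi hm; split_ifs <;> omega
                · rw [if_neg hms] at hi hm; split_ifs <;> omega
              · show (bLoop nn rest).1 + d = s + ((bLoop nn rest).1 + d) - min s m
                by_cases hms : m0 ≤ s + d
                · rw [if_pos hms] at hm; omega
                · rw [if_neg hms] at hm; omega
            · rw [if_neg hc]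
              rw [h2] at hc
              refine ⟨?_, ?_⟩
              · show (bLoop nn rest).2.1 + 1 = if m ≤ s then 1 + i else 0
                rw [h1]
                by_cases hms : m0 ≤ s + d
                · rw [if_pos hms] at hi hm; rw [if_pos hms]; split_ifs <;> omega
                · rw [if_neg hms] at hi hm; rw [if_neg hms]; split_ifs <;> omega
              · show (bLoop nn rest).2.2 = s + ((bLoop nn rest).1 + d) - min s m
                rw [h2]
                by_cases hms : m0 ≤ s + d
                · rw [if_pos hms] at hm; omega
                · rw [if_neg hms] at hm; omega

-- ===== VERDICT (by name: the statement is the Claim_ definition above) =====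
theorem best_insertion_gap_spec : Claim_equal_best_insertion_gap := by
  intro xs nn _
  unfold Spec_best_insertion_gap best_insertion_gap best_insertion_gap_alt
  simp only []
  set tl := xs.foldl (fun acc number => if number < nn then acc + 1 else acc) (0 : Int) with htl
  rw [aLoop_eq_selA]
  have h0 : (0 : Int) + (tl - 0) = tl := by ring
  rw [h0]
  rw [show selA 0 0 none (tl :: accumScores nn tl xs)
        = selA 1 0 (some tl) (accumScores nn tl xs) by simp [selA, aHit]]
  rw [selA_eq_selB _ _ _ _ (by omega)]
  have hc := bLoop_char nn xs tl
  cases h : lastMin (accumScores nn tl xs) with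
  | none =>
      rw [(selB_lastMin (accumScores nn tl xs) 1 0 tl).1 h, hc.1 h]
  | some p =>
      obtain ⟨i, m⟩ := p
      rw [(selB_lastMin (accumScores nn tl xs) 1 0 tl).2 i m h, (hc.2 i m h).1]
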